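-- pv_equiv track=rewrite | github.com/davidcediel12/Cliente-Servidor | paralelismo/k_means/using_nworkers/utils.py | cuadraticEuclideanDistanceSparseManual
-- ===== SOURCE A (Python) =====
-- def cuadraticEuclideanDistanceSparseManual(p1, p2):
--     all_keys = {**p1, **p2}
--     cuadratic_distance = 0
--     for key in all_keys.keys():
--         a = p1.get(key, 0)
--         b = p2.get(key, 0)
--         cuadratic_distance += (a-b) ** 2
--     return cuadratic_distance
-- ===== SOURCE B (Python) =====
-- def cuadraticEuclideanDistanceSparseManual(p1, p2):
--     cuadratic_distance = 0
--     for key, value in p1.items():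
--         cuadratic_distance += (value - p2.get(key, 0)) ** 2
--     for key, value in p2.items():
--         if key not in p1:
--             cuadratic_distance += value * value
--     return cuadratic_distance
-- ===== Notes on version B (the rewrite author's own statement) =====
-- stated objective: alternative
-- what changed: Drops the merged-dict construction {**p1,**p2}: one pass over p1 accumulating (v - p2.get(k,0))**2, then a pass over p2 adding v*v for keys absent from p1, preserving the p1-then-p2-only summation order.
import Mathlib
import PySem

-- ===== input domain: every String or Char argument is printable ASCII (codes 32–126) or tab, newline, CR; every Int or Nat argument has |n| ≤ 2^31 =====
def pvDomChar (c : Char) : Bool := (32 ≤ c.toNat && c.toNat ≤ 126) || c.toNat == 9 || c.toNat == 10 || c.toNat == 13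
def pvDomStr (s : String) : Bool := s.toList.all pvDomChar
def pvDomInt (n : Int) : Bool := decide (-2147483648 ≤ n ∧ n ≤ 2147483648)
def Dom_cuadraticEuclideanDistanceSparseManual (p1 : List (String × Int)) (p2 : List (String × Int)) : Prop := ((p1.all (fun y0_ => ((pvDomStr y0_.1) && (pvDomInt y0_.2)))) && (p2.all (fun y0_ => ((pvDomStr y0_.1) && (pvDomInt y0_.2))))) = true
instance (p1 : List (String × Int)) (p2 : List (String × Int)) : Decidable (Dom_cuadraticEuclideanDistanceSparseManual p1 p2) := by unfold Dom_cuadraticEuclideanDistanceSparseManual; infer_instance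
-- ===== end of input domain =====

-- B drops A's merged-dict construction: it sums (v - p2.get(k,0))^2 over p1's items, then v*v
-- over p2's keys absent from p1, in the same key order; equal cost, different decomposition.


-- ===== PORT A =====
def cuadraticEuclideanDistanceSparseManual (p1 : List (String × Int)) (p2 : List (String × Int)) : Int :=
  -- all_keys = {**p1, **p2}
  let all_keys : PySem.Dict String Int := PySem.Dict.update ⟨p1⟩ p2
  -- for key in all_keys.keys(): cuadratic_distance += (p1.get(key,0) - p2.get(key,0)) ** 2
  all_keys.keys.foldl
    (fun cuadratic_distance key =>
      let a := PySem.Dict.getD (⟨p1⟩ : PySem.Dict String Int) key 0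
      let b := PySem.Dict.getD (⟨p2⟩ : PySem.Dict String Int) key 0
      cuadratic_distance + (a - b) ^ 2) 0

-- ===== PORT B =====
def cuadraticEuclideanDistanceSparseManual_alt (p1 : List (String × Int)) (p2 : List (String × Int)) : Int :=
  -- for key, value in p1.items(): cuadratic_distance += (value - p2.get(key,0)) ** 2
  let s := p1.foldl
    (fun cuadratic_distance kv =>
      cuadratic_distance + (kv.2 - PySem.Dict.getD (⟨p2⟩ : PySem.Dict String Int) kv.1 0) ^ 2) 0
  -- for key, value in p2.items(): if key not in p1: cuadratic_distance += value * value
  p2.foldl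
    (fun cuadratic_distance kv =>
      if PySem.Dict.contains (⟨p1⟩ : PySem.Dict String Int) kv.1 then cuadratic_distance
      else cuadratic_distance + kv.2 * kv.2) s

-- ===== PRECONDITION & SPEC =====
-- Pre_ excludes association lists with a repeated key: those do not represent a Python dict
-- (the Python arguments are dicts, whose keys are unique), so the list-level behaviour there
-- is a representation artefact.
def Pre_cuadraticEuclideanDistanceSparseManual (p1 : List (String × Int)) (p2 : List (String × Int)) : Prop :=
  (p1.map Prod.fst).Nodup ∧ (p2.map Prod.fst).Nodup
instance (p1 : List (String × Int)) (p2 : List (String × Int)) : Decidable (Pre_cuadraticEuclideanDistanceSparseManual p1 p2) := by unfold Pre_cuadraticEuclideanDistanceSparseManual; infer_instance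
def pvWitness_cuadraticEuclideanDistanceSparseManual : (List (String × Int)) × (List (String × Int)) :=
  ([("a", 1), ("b", -2)], [("b", 3), ("c", 4)])

def Spec_cuadraticEuclideanDistanceSparseManual (p1 : List (String × Int)) (p2 : List (String × Int)) (out : Int) : Prop := out = cuadraticEuclideanDistanceSparseManual_alt p1 p2
instance (p1 : List (String × Int)) (p2 : List (String × Int)) (out : Int) : Decidable (Spec_cuadraticEuclideanDistanceSparseManual p1 p2 out) := by unfold Spec_cuadraticEuclideanDistanceSparseManual; infer_instance

-- ===== CLAIM (what is proved, stated in full; the proofs are below) =====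
def Claim_equal_cuadraticEuclideanDistanceSparseManual : Prop := ∀ (p1 : List (String × Int)) (p2 : List (String × Int)), Dom_cuadraticEuclideanDistanceSparseManual p1 p2 → Pre_cuadraticEuclideanDistanceSparseManual p1 p2 → Spec_cuadraticEuclideanDistanceSparseManual p1 p2 (cuadraticEuclideanDistanceSparseManual p1 p2)

-- ===== LEMMAS AND PROOFS =====

-- Set.ofList of a duplicate-free list is the list itself.
theorem pv_ofList_nodup {α : Type} [BEq α] [LawfulBEq α] (xs : List α) (h : xs.Nodup) :
    PySem.Set.ofList xs = xs := by
  have h1 : PySem.Set.update ([] : PySem.Set α) xs = [] ++ xs :=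
    PySem.Set.update_eq_append_of_disjoint _ _ h (by intro x _ hx; simp at hx)
  simpa [PySem.Set.ofList, PySem.Set.update, PySem.Set.empty] using h1

-- First loop of B: the A-side fold over p1's keys equals B's fold over p1's items.
theorem pv_loop1 (d1 d2 : PySem.Dict String Int)
    (hv : ∀ kv ∈ d1.items, d1.getD kv.1 0 = kv.2) :
    ∀ (l : List (String × Int)) (acc : Int), (∀ kv ∈ l, kv ∈ d1.items) →
    (l.map Prod.fst).foldl
      (fun c k => c + (d1.getD k 0 - d2.getD k 0) ^ 2) acc
    = l.foldl (fun c kv => c + (kv.2 - d2.getD kv.1 0) ^ 2) acc := by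
  intro l
  induction l with
  | nil => intro acc _; rfl
  | cons kv t ih =>
      intro acc hmem
      have hk : d1.getD kv.1 0 = kv.2 := hv kv (hmem kv (by simp))
      simp only [List.map_cons, List.foldl_cons, hk]
      exact ih _ (fun x hx => hmem x (by simp [hx]))

-- Second loop of B: the A-side fold over p2-only keys equals B's guarded fold over p2's items.
theorem pv_loop2 (d1 d2 : PySem.Dict String Int)
    (hv : ∀ kv ∈ d2.items, d2.getD kv.1 0 = kv.2) :
    ∀ (l : List (String × Int)) (acc : Int), (∀ kv ∈ l, kv ∈ d2.items) →
    (((l.map Prod.fst).filter (fun k => !d1.contains k)).foldl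
      (fun c k => c + (d1.getD k 0 - d2.getD k 0) ^ 2) acc)
    = l.foldl (fun c kv => if d1.contains kv.1 then c else c + kv.2 * kv.2) acc := by
  intro l
  induction l with
  | nil => intro acc _; rfl
  | cons kv t ih =>
      intro acc hmem
      have hk : d2.getD kv.1 0 = kv.2 := hv kv (hmem kv (by simp))
      have ht : ∀ x ∈ t, x ∈ d2.items := fun x hx => hmem x (by simp [hx])
      by_cases hc : d1.contains kv.1
      · simp only [List.map_cons, List.filter_cons, hc, Bool.not_true, List.foldl_cons]
        exact ih _ ht
      · have hc' : d1.contains kv.1 = false := by simpa using hc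
        have h0 : d1.getD kv.1 0 = 0 := PySem.Dict.getD_of_not_contains d1 0 hc'
        simp only [List.map_cons, List.filter_cons, hc', Bool.not_false, if_true,
          List.foldl_cons, Bool.false_eq_true, if_false]
        rw [h0, hk]
        rw [show acc + (0 - kv.2) ^ 2 = acc + kv.2 * kv.2 by ring]
        exact ih _ ht

theorem cuadraticEuclideanDistanceSparseManual_eq (p1 p2 : List (String × Int))
    (h1 : (p1.map Prod.fst).Nodup) (h2 : (p2.map Prod.fst).Nodup) :
    cuadraticEuclideanDistanceSparseManual p1 p2
    = cuadraticEuclideanDistanceSparseManual_alt p1 p2 := by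
  unfold cuadraticEuclideanDistanceSparseManual cuadraticEuclideanDistanceSparseManual_alt
  dsimp only
  have hd1 : (⟨p1⟩ : PySem.Dict String Int).items = p1 := rfl
  have hd2 : (⟨p2⟩ : PySem.Dict String Int).items = p2 := rfl
  have hn1 : (⟨p1⟩ : PySem.Dict String Int).keys.Nodup := by
    simpa [PySem.Dict.keys, hd1] using h1
  have hn2 : (⟨p2⟩ : PySem.Dict String Int).keys.Nodup := by
    simpa [PySem.Dict.keys, hd2] using h2
  have hkeys : (PySem.Dict.update (⟨p1⟩ : PySem.Dict String Int) p2).keys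
      = PySem.Set.update (⟨p1⟩ : PySem.Dict String Int).keys (p2.map Prod.fst) := by
    simpa [PySem.Dict.update] using
      (PySem.Dict.keys_foldl_insert_key (κ := String) (ν := Int) p2 Prod.fst
        (fun _ kv => kv.2) (⟨p1⟩ : PySem.Dict String Int))
  have hupd : PySem.Set.update (⟨p1⟩ : PySem.Dict String Int).keys (p2.map Prod.fst)
      = (⟨p1⟩ : PySem.Dict String Int).keys
        ++ (p2.map Prod.fst).filter
            (fun y => !PySem.Set.contains (⟨p1⟩ : PySem.Dict String Int).keys y) := by
    rw [PySem.Set.update_eq_append_filter, pv_ofList_nodup _ h2]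
  have hcont : ∀ y : String,
      PySem.Set.contains (⟨p1⟩ : PySem.Dict String Int).keys y
      = PySem.Dict.contains (⟨p1⟩ : PySem.Dict String Int) y := by
    intro y
    simp only [PySem.Set.contains, PySem.Dict.contains, PySem.Dict.keys, List.contains]
    rw [Bool.eq_iff_iff]
    simp only [List.any_eq_true, beq_iff_eq]
    simp [List.mem_map]
  have hv1 : ∀ kv ∈ (⟨p1⟩ : PySem.Dict String Int).items,
      (⟨p1⟩ : PySem.Dict String Int).getD kv.1 0 = kv.2 := by
    intro kv hkv
    exact PySem.Dict.getD_of_mem_items _ (by simpa using hkv) hn1 0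
  have hv2 : ∀ kv ∈ (⟨p2⟩ : PySem.Dict String Int).items,
      (⟨p2⟩ : PySem.Dict String Int).getD kv.1 0 = kv.2 := by
    intro kv hkv
    exact PySem.Dict.getD_of_mem_items _ (by simpa using hkv) hn2 0
  rw [hkeys, hupd, List.foldl_append]
  have hfilter : (p2.map Prod.fst).filter
        (fun y => !PySem.Set.contains (⟨p1⟩ : PySem.Dict String Int).keys y)
      = (p2.map Prod.fst).filter
        (fun y => !PySem.Dict.contains (⟨p1⟩ : PySem.Dict String Int) y) := by
    apply List.filter_congr; intro y _; rw [hcont y]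
  rw [hfilter]
  have hKp1 : (⟨p1⟩ : PySem.Dict String Int).keys = p1.map Prod.fst := rfl
  rw [hKp1]
  rw [pv_loop1 (⟨p1⟩ : PySem.Dict String Int) (⟨p2⟩ : PySem.Dict String Int) hv1 p1 0
    (fun kv hkv => by simpa [hd1] using hkv)]
  exact pv_loop2 (⟨p1⟩ : PySem.Dict String Int) (⟨p2⟩ : PySem.Dict String Int) hv2 p2 _
    (fun kv hkv => by simpa [hd2] using hkv)

-- ===== VERDICT (by name: the statement is the Claim_ definition above) =====
theorem cuadraticEuclideanDistanceSparseManual_spec : Claim_equal_cuadraticEuclideanDistanceSparseManual := by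
  intro p1 p2 _ hpre
  unfold Spec_cuadraticEuclideanDistanceSparseManual
  exact cuadraticEuclideanDistanceSparseManual_eq p1 p2 hpre.1 hpre.2
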